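-- pv_equiv track=rewrite | github.com/renatoprado18/prospect-system-imensiah | app/services/auto_tags.py | analisar_cargo
-- ===== SOURCE A (Python) =====
-- from typing import Dict, List, Optional, Set
--
-- CARGO_TAGS = {
--     "c-level": [
--         "ceo", "cfo", "cto", "coo", "cmo", "cio", "chro",
--         "chief", "presidente", "president"
--     ],
--     "diretor": [
--         "diretor", "director", "vp", "vice-president",
--         "vice presidente", "head of", "head"
--     ],
--     "gerente": [
--         "gerente", "manager", "coordenador", "coordinator",
--         "supervisor", "lider", "leader", "lead"
--     ],
--     "socio": [
--         "socio", "partner", "founding", "fundador", "founder",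
--         "co-founder", "cofundador", "owner", "proprietario"
--     ],
--     "conselheiro": [
--         "conselheiro", "board", "advisor", "membro do conselho",
--         "board member", "chairman", "presidente do conselho"
--     ],
--     "executivo": [
--         "executivo", "executive", "officer", "senior"
--     ]
-- }
--
-- def normalize_text(text: str) -> str:
--     """Normaliza texto para comparacao."""
--     if not text:
--         return ""
--     return text.lower().strip()
--
-- def check_keywords(text: str, keywords: List[str]) -> bool:
--     """Verifica se texto contem alguma keyword."""
--     text_lower = normalize_text(text)
--     return any(kw in text_lower for kw in keywords)
--
-- def analisar_cargo(cargo: str) -> Set[str]: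
--     """Analisa cargo e retorna tags de nivel hierarquico."""
--     tags = set()
--     if not cargo:
--         return tags
--
--     cargo_lower = normalize_text(cargo)
--
--     for tag, keywords in CARGO_TAGS.items():
--         if check_keywords(cargo_lower, keywords):
--             tags.add(tag)
--
--     return tags
-- ===== SOURCE B (Python) =====
-- # B: text-driven scan - walk the normalized title position by position, testing each
-- # keyword as a prefix at that position (startswith with offset), recording hits in a
-- # boolean table indexed by tag number; finally materialize tags from the table.
-- CARGO_TAGS = {
--     "c-level": [
--         "ceo", "cfo", "cto", "coo", "cmo", "cio", "chro",
--         "chief", "presidente", "president"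
--     ],
--     "diretor": [
--         "diretor", "director", "vp", "vice-president",
--         "vice presidente", "head of", "head"
--     ],
--     "gerente": [
--         "gerente", "manager", "coordenador", "coordinator",
--         "supervisor", "lider", "leader", "lead"
--     ],
--     "socio": [
--         "socio", "partner", "founding", "fundador", "founder",
--         "co-founder", "cofundador", "owner", "proprietario"
--     ],
--     "conselheiro": [
--         "conselheiro", "board", "advisor", "membro do conselho",
--         "board member", "chairman", "presidente do conselho"
--     ],
--     "executivo": [
--         "executivo", "executive", "officer", "senior"
--     ]
-- }
--
-- TAGS = list(CARGO_TAGS)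
-- KEYWORD_INDEX = [(kw, t) for t, tag in enumerate(TAGS) for kw in CARGO_TAGS[tag]]
--
-- def analisar_cargo(cargo):
--     if not cargo:
--         return set()
--     c = cargo.lower().strip()
--     hit = [False] * len(TAGS)
--     for i in range(len(c)):
--         for kw, t in KEYWORD_INDEX:
--             if c.startswith(kw, i):
--                 hit[t] = True
--     return {tag for tag, flag in zip(TAGS, hit) if flag}
-- ===== Notes on version B (the rewrite author's own statement) =====
-- stated objective: alternative
-- what changed: Replaces A's keyword-driven scan (per tag, test each keyword with substring-in) by a text-driven scan: walk the normalized title position by position, test each keyword as a prefix at that position, mark hits in a boolean table indexed by tag number, and materialize the tag set from the table at the end.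
import Mathlib
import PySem

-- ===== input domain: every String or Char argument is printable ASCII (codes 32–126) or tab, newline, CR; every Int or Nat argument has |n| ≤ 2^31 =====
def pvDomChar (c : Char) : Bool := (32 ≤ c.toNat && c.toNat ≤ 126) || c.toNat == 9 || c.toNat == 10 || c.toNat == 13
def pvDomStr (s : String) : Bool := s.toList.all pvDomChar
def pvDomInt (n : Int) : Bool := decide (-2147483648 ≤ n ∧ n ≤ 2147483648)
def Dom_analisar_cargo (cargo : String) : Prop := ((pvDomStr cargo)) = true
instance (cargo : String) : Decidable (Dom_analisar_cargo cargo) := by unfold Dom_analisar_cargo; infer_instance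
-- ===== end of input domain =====

-- B replaces A's keyword-driven substring scan by a text-driven position scan with
-- prefix tests and a boolean hit table indexed by tag number (alternative, same cost).

-- ===== PORT A =====
def pvCARGO_TAGS : List (String × List String) :=
  [("c-level", ["ceo", "cfo", "cto", "coo", "cmo", "cio", "chro", "chief", "presidente", "president"]),
   ("diretor", ["diretor", "director", "vp", "vice-president", "vice presidente", "head of", "head"]),
   ("gerente", ["gerente", "manager", "coordenador", "coordinator", "supervisor", "lider", "leader", "lead"]),
   ("socio", ["socio", "partner", "founding", "fundador", "founder", "co-founder", "cofundador", "owner", "proprietario"]),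
   ("conselheiro", ["conselheiro", "board", "advisor", "membro do conselho", "board member", "chairman", "presidente do conselho"]),
   ("executivo", ["executivo", "executive", "officer", "senior"])]

def normalize_text (text : String) : String :=
  if text = "" then "" else PySem.Str.strip (PySem.Str.lower text)

def check_keywords (text : String) (keywords : List String) : Bool :=
  let text_lower := normalize_text text
  keywords.any (fun kw => PySem.Str.isIn kw text_lower)

def analisar_cargo (cargo : String) : List String :=
  let tags : PySem.Set String := PySem.Set.empty
  if cargo = "" then tags
  else
    let cargo_lower := normalize_text cargo
    pvCARGO_TAGS.foldl
      (fun tags p => if check_keywords cargo_lower p.2 then PySem.Set.add tags p.1 else tags) tags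

-- ===== PORT B =====
-- TAGS = list(CARGO_TAGS)
def pvTAGS : List String := pvCARGO_TAGS.map Prod.fst
-- KEYWORD_INDEX = [(kw, t) for t, tag in enumerate(TAGS) for kw in CARGO_TAGS[tag]]
-- (CARGO_TAGS[tag] always succeeds here; assoc-list lookup with default [] is exact)
def pvKEYWORD_INDEX : List (String × Int) :=
  (PySem.List.enumerate pvTAGS 0).flatMap
    (fun q => ((pvCARGO_TAGS.lookup q.2).getD []).map (fun kw => (kw, q.1)))

-- c.startswith(kw, i): exact for the offsets used (0 ≤ i < len(c))
def pvStartsAt (c : String) (kw : String) (i : Int) : Bool :=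
  kw.toList.isPrefixOf (c.toList.drop i.toNat)

-- inner loop body: for kw, t in KEYWORD_INDEX: if c.startswith(kw, i): hit[t] = True
-- (t is always 0 ≤ t < len(hit), so List.set is exact for the Python assignment)
def pvMarkAt (c : String) (i : Int) (hit : List Bool) : List Bool :=
  pvKEYWORD_INDEX.foldl
    (fun h p => if pvStartsAt c p.1 i then h.set p.2.toNat true else h) hit

-- hit = [False]*len(TAGS); for i in range(len(c)): inner loop
def pvHits (c : String) : List Bool :=
  (PySem.List.pyRange 0 (PySem.Str.len c) 1).foldl
    (fun h i => pvMarkAt c i h) (List.replicate pvTAGS.length false)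

def analisar_cargo_alt (cargo : String) : List String :=
  if cargo = "" then PySem.Set.empty
  else
    let c := PySem.Str.strip (PySem.Str.lower cargo)
    (pvTAGS.zip (pvHits c)).foldl
      (fun s p => if p.2 then PySem.Set.add s p.1 else s) PySem.Set.empty

-- ===== PRECONDITION & SPEC =====
def Spec_analisar_cargo (cargo : String) (out : List String) : Prop := out = analisar_cargo_alt cargo
instance (cargo : String) (out : List String) : Decidable (Spec_analisar_cargo cargo out) := by unfold Spec_analisar_cargo; infer_instance

-- ===== CLAIM (what is proved, stated in full; the proofs are below) =====
def Claim_equal_analisar_cargo : Prop := ∀ (cargo : String), Dom_analisar_cargo cargo → Spec_analisar_cargo cargo (analisar_cargo cargo)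

-- ===== LEMMAS AND PROOFS =====

-- normalize_text lemmas (A normalizes twice; the second pass is the identity)
theorem pv_isupper_toNat {c : Char} (h : PySem.Chars.isupper c = true) :
    65 ≤ c.toNat ∧ c.toNat ≤ 90 := by
  simp only [PySem.Chars.isupper, Bool.and_eq_true, decide_eq_true_eq] at h
  exact ⟨h.1, h.2⟩

theorem pv_toNat_ofNat_add32 {c : Char} (h : c.toNat ≤ 90) :
    (Char.ofNat (c.toNat + 32)).toNat = c.toNat + 32 := by
  rw [Char.toNat_ofNat]
  have : (c.toNat + 32).isValidChar := Or.inl (by omega)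
  simp [this]

theorem pv_isspace_lowerChar (c : Char) :
    PySem.Chars.isspace (PySem.Chars.lowerChar c) = PySem.Chars.isspace c := by
  unfold PySem.Chars.lowerChar
  by_cases h : PySem.Chars.isupper c = true
  · obtain ⟨h1, h2⟩ := pv_isupper_toNat h
    have hn := pv_toNat_ofNat_add32 h2
    simp only [h, if_true]
    have hl : PySem.Chars.isspace (Char.ofNat (c.toNat + 32)) = false := by
      unfold PySem.Chars.isspace
      simp only [Bool.or_eq_false_iff, Bool.and_eq_false_iff, decide_eq_false_iff_not]
      omega
    have hr : PySem.Chars.isspace c = false := by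
      unfold PySem.Chars.isspace
      simp only [Bool.or_eq_false_iff, Bool.and_eq_false_iff, decide_eq_false_iff_not]
      omega
    rw [hl, hr]
  · simp [h]

theorem pv_lowerChar_lowerChar (c : Char) :
    PySem.Chars.lowerChar (PySem.Chars.lowerChar c) = PySem.Chars.lowerChar c := by
  unfold PySem.Chars.lowerChar
  by_cases h : PySem.Chars.isupper c = true
  · obtain ⟨h1, h2⟩ := pv_isupper_toNat h
    simp only [h, if_true]
    have hn := pv_toNat_ofNat_add32 h2
    have : PySem.Chars.isupper (Char.ofNat (c.toNat + 32)) = false := by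
      unfold PySem.Chars.isupper
      simp only [Bool.and_eq_false_iff, decide_eq_false_iff_not]
      right
      intro hle
      have h90 : (Char.ofNat (c.toNat + 32)).toNat ≤ 90 := hle
      omega
    simp [this]
  · simp [h]

theorem pv_comp_isspace_lowerChar :
    (PySem.Chars.isspace ∘ PySem.Chars.lowerChar) = PySem.Chars.isspace :=
  funext fun c => pv_isspace_lowerChar c

theorem pv_lower_lower (l : List Char) :
    PySem.Chars.lower (PySem.Chars.lower l) = PySem.Chars.lower l := by
  simp [PySem.Chars.lower, List.map_map, Function.comp, pv_lowerChar_lowerChar]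

theorem pv_strip_lower (l : List Char) :
    PySem.Chars.strip (PySem.Chars.lower l) = PySem.Chars.lower (PySem.Chars.strip l) := by
  unfold PySem.Chars.strip PySem.Chars.lstrip PySem.Chars.rstrip PySem.Chars.lower
  rw [List.dropWhile_map, pv_comp_isspace_lowerChar, ← List.map_reverse,
      List.dropWhile_map, pv_comp_isspace_lowerChar, ← List.map_reverse]

theorem pv_dropWhile_idem (p : Char → Bool) (l : List Char) :
    List.dropWhile p (List.dropWhile p l) = List.dropWhile p l := by
  induction l with
  | nil => simp
  | cons a t ih =>
    by_cases h : p a = true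
    · simp [h, ih]
    · simp [h]

theorem pv_lstrip_rstrip (l : List Char)
    (h : List.dropWhile PySem.Chars.isspace l = l) :
    List.dropWhile PySem.Chars.isspace (PySem.Chars.rstrip l) = PySem.Chars.rstrip l := by
  cases l with
  | nil => simp [PySem.Chars.rstrip]
  | cons a t =>
    have ha : PySem.Chars.isspace a = false := by
      by_cases hpa : PySem.Chars.isspace a = true
      · exfalso
        rw [List.dropWhile_cons, hpa] at h
        simp only [if_true] at h
        have := congrArg List.length h
        have hle := List.length_dropWhile_le PySem.Chars.isspace t
        simp at this
        omega
      · simpa using hpa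
    unfold PySem.Chars.rstrip
    have hsuf : List.dropWhile PySem.Chars.isspace (a :: t).reverse <:+ (a :: t).reverse :=
      List.dropWhile_suffix _
    have hpre : (List.dropWhile PySem.Chars.isspace (a :: t).reverse).reverse <+: (a :: t) := by
      have h' := List.reverse_prefix.mpr hsuf
      rwa [List.reverse_reverse] at h'
    cases hrev : (List.dropWhile PySem.Chars.isspace (a :: t).reverse).reverse with
    | nil => simp
    | cons b u =>
      rw [hrev] at hpre
      have hb : b = a := (List.cons_prefix_cons.mp hpre).1
      rw [List.dropWhile_cons, hb, ha]
      simp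

theorem pv_strip_strip (l : List Char) :
    PySem.Chars.strip (PySem.Chars.strip l) = PySem.Chars.strip l := by
  unfold PySem.Chars.strip
  set y := PySem.Chars.lstrip l with hy
  have hylfix : List.dropWhile PySem.Chars.isspace y = y := by
    rw [hy]; unfold PySem.Chars.lstrip; exact pv_dropWhile_idem _ _
  have h1 : PySem.Chars.lstrip (PySem.Chars.rstrip y) = PySem.Chars.rstrip y := by
    unfold PySem.Chars.lstrip
    exact pv_lstrip_rstrip y hylfix
  rw [h1]
  unfold PySem.Chars.rstrip
  rw [List.reverse_reverse, pv_dropWhile_idem]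

theorem pv_norm_norm_toList (c : String) :
    (normalize_text (normalize_text c)).toList = (normalize_text c).toList := by
  unfold normalize_text
  by_cases hc : c = ""
  · simp [hc]
  · simp only [hc, if_false]
    by_cases hr : PySem.Str.strip (PySem.Str.lower c) = ""
    · simp [hr]
    · simp only [hr, if_false]
      rw [PySem.Str.toList_strip, PySem.Str.toList_lower,
          PySem.Str.toList_strip, PySem.Str.toList_lower]
      rw [← pv_strip_lower, pv_lower_lower, pv_strip_strip]

-- B-side loop lemmas: characterize the hit table through the folds
theorem pv_foldl_set_length {α : Type} (P : α → Bool) (f : α → Nat) :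
    ∀ (L : List α) (h : List Bool),
      (L.foldl (fun h p => if P p then h.set (f p) true else h) h).length = h.length := by
  intro L
  induction L with
  | nil => intro h; simp
  | cons a L ih =>
    intro h
    simp only [List.foldl_cons]
    by_cases hp : P a = true
    · rw [hp, if_pos rfl, ih, List.length_set]
    · simp only [hp]; exact ih h

theorem pv_foldl_set_getD {α : Type} (P : α → Bool) (f : α → Nat) :
    ∀ (L : List α) (h : List Bool) (t : Nat), t < h.length →
      (L.foldl (fun h p => if P p then h.set (f p) true else h) h).getD t false
        = (h.getD t false || L.any (fun p => P p && f p == t)) := by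
  intro L
  induction L with
  | nil => intro h t ht; simp
  | cons a L ih =>
    intro h t ht
    simp only [List.foldl_cons, List.any_cons]
    by_cases hp : P a = true
    · simp only [hp, if_true, Bool.true_and]
      rw [ih _ t (by rw [List.length_set]; exact ht)]
      by_cases he : f a = t
      · have : (h.set (f a) true).getD t false = true := by
          subst he
          rw [List.getD_eq_getElem _ _ (by rw [List.length_set]; exact ht)]
          simp [List.getElem_set_self]
        rw [this, he]
        simp
      · have : (h.set (f a) true).getD t false = h.getD t false := by
          rw [List.getD_eq_getElem?_getD, List.getD_eq_getElem?_getD,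
              List.getElem?_set_ne he]
        rw [this, beq_eq_false_iff_ne.mpr he]
        simp
    · simp only [hp, Bool.false_and, Bool.false_or]
      exact ih h t ht

theorem pv_markAt_length (c : String) (i : Int) (hit : List Bool) :
    (pvMarkAt c i hit).length = hit.length := by
  unfold pvMarkAt
  exact pv_foldl_set_length _ _ _ hit

theorem pv_outer_length (c : String) :
    ∀ (idxs : List Int) (h : List Bool),
      (idxs.foldl (fun h i => pvMarkAt c i h) h).length = h.length := by
  intro idxs
  induction idxs with
  | nil => intro h; simp
  | cons i idxs ih => intro h; simp only [List.foldl_cons]; rw [ih, pv_markAt_length]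

theorem pv_outer_getD (c : String) :
    ∀ (idxs : List Int) (h : List Bool) (t : Nat), t < h.length →
      (idxs.foldl (fun h i => pvMarkAt c i h) h).getD t false
        = (h.getD t false
            || idxs.any (fun i => pvKEYWORD_INDEX.any
                 (fun p => pvStartsAt c p.1 i && p.2.toNat == t))) := by
  intro idxs
  induction idxs with
  | nil => intro h t ht; simp
  | cons i idxs ih =>
    intro h t ht
    simp only [List.foldl_cons, List.any_cons]
    rw [ih _ t (by rw [pv_markAt_length]; exact ht)]
    unfold pvMarkAt
    rw [pv_foldl_set_getD _ _ _ h t ht]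
    simp [Bool.or_assoc]

-- exchange the two 'any's
theorem pv_any_swap {α : Type} (idxs : List Int) (L : List α)
    (g : α → Int → Bool) (e : α → Bool) :
    idxs.any (fun i => L.any (fun p => g p i && e p))
      = L.any (fun p => e p && idxs.any (fun i => g p i)) := by
  rw [Bool.eq_iff_iff]
  simp only [List.any_eq_true, Bool.and_eq_true]
  constructor
  · rintro ⟨i, hi, p, hp, hg, he⟩; exact ⟨p, hp, he, i, hi, hg⟩
  · rintro ⟨p, hp, he, i, hi, hg⟩; exact ⟨i, hi, p, hp, hg, he⟩

-- a nonempty keyword occurs at some scanned position iff it is a substring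
theorem pv_any_startsAt (c kw : String) (hkw : kw ≠ "") :
    (PySem.List.pyRange 0 (c.length : Int) 1).any (fun i => pvStartsAt c kw i)
      = PySem.Chars.isIn kw.toList c.toList := by
  have hne : kw.toList ≠ [] := by
    intro h
    exact hkw (String.toList_eq_nil_iff.mp h)
  rw [Bool.eq_iff_iff]
  constructor
  · intro h
    obtain ⟨i, hi, hpre⟩ := List.any_eq_true.mp h
    unfold pvStartsAt at hpre
    rw [List.isPrefixOf_iff_prefix] at hpre
    exact (PySem.Chars.exists_prefix_drop_iff_isIn _ _).mp ⟨i.toNat, hpre⟩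
  · intro h
    obtain ⟨j, hj⟩ := (PySem.Chars.exists_prefix_drop_iff_isIn _ _).mpr h
    have hjlt : j < c.toList.length := by
      by_contra hge
      rw [List.drop_eq_nil_of_le (Nat.le_of_not_lt hge), List.prefix_nil] at hj
      exact hne hj
    apply List.any_eq_true.mpr
    refine ⟨(j : Int), ?_, ?_⟩
    · rw [PySem.List.mem_pyRange_one]
      constructor
      · exact_mod_cast Int.natCast_nonneg j
      · rw [String.length_toList] at hjlt
        exact_mod_cast hjlt
    · unfold pvStartsAt
      rw [List.isPrefixOf_iff_prefix, Int.toNat_natCast]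
      exact hj

-- the hit table, entry by entry, is A's per-tag condition
theorem pv_hits_eq (c : String) :
    pvHits c = pvCARGO_TAGS.map
      (fun p => p.2.any (fun kw => PySem.Chars.isIn kw.toList c.toList)) := by
  have hlen : (pvHits c).length = 6 := by
    unfold pvHits
    rw [pv_outer_length]
    rfl
  apply List.ext_getElem (by rw [hlen]; rfl)
  intro t h1 h2
  have ht6 : t < 6 := by rw [hlen] at h1; exact h1
  have hgetD : (pvHits c)[t] = (pvHits c).getD t false := by
    rw [List.getD_eq_getElem _ _ h1]
  rw [hgetD]
  unfold pvHits
  rw [pv_outer_getD c _ _ t (by simp [pvTAGS, pvCARGO_TAGS]; omega)]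
  rw [pv_any_swap]
  rw [show pvKEYWORD_INDEX =
      [("ceo", (0:Int)), ("cfo", 0), ("cto", 0), ("coo", 0), ("cmo", 0), ("cio", 0), ("chro", 0),
       ("chief", 0), ("presidente", 0), ("president", 0),
       ("diretor", 1), ("director", 1), ("vp", 1), ("vice-president", 1),
       ("vice presidente", 1), ("head of", 1), ("head", 1),
       ("gerente", 2), ("manager", 2), ("coordenador", 2), ("coordinator", 2),
       ("supervisor", 2), ("lider", 2), ("leader", 2), ("lead", 2),
       ("socio", 3), ("partner", 3), ("founding", 3), ("fundador", 3), ("founder", 3),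
       ("co-founder", 3), ("cofundador", 3), ("owner", 3), ("proprietario", 3),
       ("conselheiro", 4), ("board", 4), ("advisor", 4), ("membro do conselho", 4),
       ("board member", 4), ("chairman", 4), ("presidente do conselho", 4),
       ("executivo", 5), ("executive", 5), ("officer", 5), ("senior", 5)] from rfl]
  interval_cases t <;>
    simp [pvCARGO_TAGS, pv_any_startsAt]

-- ===== VERDICT (by name: the statement is the Claim_ definition above) =====
theorem analisar_cargo_spec : Claim_equal_analisar_cargo := by
  intro cargo _
  unfold Spec_analisar_cargo analisar_cargo analisar_cargo_alt
  by_cases hc : cargo = ""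
  · simp [hc]
  · simp only [hc, if_false]
    rw [pv_hits_eq]
    have hnorm : ∀ kw : String,
        PySem.Str.isIn kw (normalize_text (normalize_text cargo))
          = PySem.Chars.isIn kw.toList (PySem.Str.strip (PySem.Str.lower cargo)).toList := by
      intro kw
      rw [PySem.Str.isIn_eq, pv_norm_norm_toList]
      unfold normalize_text
      rw [if_neg hc]
    simp only [check_keywords, hnorm]
    simp [pvCARGO_TAGS, pvTAGS]
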